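-- pv_equiv track=rewrite | github.com/JuanDZM2105/problema-de-asignacion--heuristico | score.py | calculate_isolated_employee
-- ===== SOURCE A (Python) =====
-- def _emp_to_group(employees_g):
--     return {e: g for g, es in employees_g.items() for e in es}
--
-- def calculate_isolated_employee(sol, employees_g):
--     emp_to_group = _emp_to_group(employees_g)
--     violations = 0
--     for _, zones in sol.items():
--         for _, assignments in zones.items():
--             empleados = [emp for _, emp in assignments]
--             for emp in empleados:
--                 g = emp_to_group.get(emp)
--                 if g is None:   # robustez: ignora empleados sin grupo
--                     continue
--                 count_same = sum(1 for ee in empleados if emp_to_group.get(ee) == g)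
--                 if count_same == 1:
--                     violations += 1
--     return violations
-- ===== SOURCE B (Python) =====
-- def calculate_isolated_employee(sol, employees_g):
--     emp_to_group = {e: g for g, es in employees_g.items() for e in es}
--     violations = 0
--     for zones in sol.values():
--         for assignments in zones.values():
--             groups = [g for g in (emp_to_group.get(emp) for _, emp in assignments) if g is not None]
--             freq = {}
--             for g in groups:
--                 freq[g] = freq.get(g, 0) + 1
--             violations += sum(1 for c in freq.values() if c == 1)
--     return violations
-- ===== Notes on version B (the rewrite author's own statement) =====
-- stated objective: simpler
-- what changed: A's per-employee isolation scan (for each employee, re-count how many co-assigned employees share its group) is replaced by building one group-frequency table per assignment list and adding the number of groups whose count is exactly 1.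
import Mathlib
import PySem

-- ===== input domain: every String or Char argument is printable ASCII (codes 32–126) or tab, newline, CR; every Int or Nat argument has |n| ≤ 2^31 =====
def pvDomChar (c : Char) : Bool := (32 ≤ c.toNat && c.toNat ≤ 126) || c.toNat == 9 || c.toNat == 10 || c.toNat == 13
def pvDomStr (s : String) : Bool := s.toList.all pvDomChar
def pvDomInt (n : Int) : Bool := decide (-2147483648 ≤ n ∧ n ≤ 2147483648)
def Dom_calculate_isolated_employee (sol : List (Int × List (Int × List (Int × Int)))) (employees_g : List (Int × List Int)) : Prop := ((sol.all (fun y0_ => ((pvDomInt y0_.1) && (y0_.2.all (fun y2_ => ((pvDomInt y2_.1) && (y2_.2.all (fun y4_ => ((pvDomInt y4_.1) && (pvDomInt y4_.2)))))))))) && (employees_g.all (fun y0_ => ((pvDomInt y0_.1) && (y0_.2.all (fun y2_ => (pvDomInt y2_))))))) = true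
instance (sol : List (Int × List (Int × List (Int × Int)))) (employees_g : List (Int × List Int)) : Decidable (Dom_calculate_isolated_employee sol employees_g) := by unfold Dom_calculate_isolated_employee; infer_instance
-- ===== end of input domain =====

-- B replaces A's per-employee isolation scan (quadratic in each assignment list) by one
-- frequency table per list followed by counting its singleton groups; objective: simpler decomposition.

-- ===== PORT A =====
-- helper: _emp_to_group (dict comprehension, later entries overwrite)
def pvEmpToGroup (employees_g : List (Int × List Int)) : PySem.Dict Int Int :=
  employees_g.foldl (fun d p => p.2.foldl (fun d e => d.insert e p.1) d) PySem.Dict.empty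

def calculate_isolated_employee (sol : List (Int × List (Int × List (Int × Int)))) (employees_g : List (Int × List Int)) : Int :=
  let emp_to_group := pvEmpToGroup employees_g
  sol.foldl (fun violations z =>
    z.2.foldl (fun violations asg =>
      let empleados := asg.2.map (·.2)
      empleados.foldl (fun violations emp =>
        match emp_to_group.get? emp with
        | none => violations        -- robustez: ignora empleados sin grupo
        | some g =>
          let count_same : Int :=
            empleados.foldl (fun s ee => if emp_to_group.get? ee == some g then s + 1 else s) 0
          if count_same == 1 then violations + 1 else violations) violations) violations) 0

-- ===== PORT B =====
def calculate_isolated_employee_alt (sol : List (Int × List (Int × List (Int × Int)))) (employees_g : List (Int × List Int)) : Int :=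
  let emp_to_group := pvEmpToGroup employees_g
  sol.foldl (fun violations z =>
    z.2.foldl (fun violations asg =>
      let groups := asg.2.filterMap (fun p => emp_to_group.get? p.2)
      let freq : PySem.Dict Int Int := groups.foldl (fun f g => f.insert g (f.getD g 0 + 1)) PySem.Dict.empty
      violations + freq.values.foldl (fun s c => if c == 1 then s + 1 else s) 0) violations) 0

-- ===== PRECONDITION & SPEC =====
def Spec_calculate_isolated_employee (sol : List (Int × List (Int × List (Int × Int)))) (employees_g : List (Int × List Int)) (out : Int) : Prop := out = calculate_isolated_employee_alt sol employees_g
instance (sol : List (Int × List (Int × List (Int × Int)))) (employees_g : List (Int × List Int)) (out : Int) : Decidable (Spec_calculate_isolated_employee sol employees_g out) := by unfold Spec_calculate_isolated_employee; infer_instance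

-- ===== CLAIM (what is proved, stated in full; the proofs are below) =====
def Claim_equal_calculate_isolated_employee : Prop := ∀ (sol : List (Int × List (Int × List (Int × Int)))) (employees_g : List (Int × List Int)), Dom_calculate_isolated_employee sol employees_g → Spec_calculate_isolated_employee sol employees_g (calculate_isolated_employee sol employees_g)

-- ===== LEMMAS AND PROOFS =====

-- counting employees whose group lookup is `some g` = counting g in the filterMap of lookups
lemma pv_countA (m : PySem.Dict Int Int) (emps : List Int) (g : Int) :
    List.countP (fun ee => m.get? ee == some g) emps
      = List.count g (emps.filterMap m.get?) := by
  induction emps with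
  | nil => simp
  | cons a t ih =>
    rw [List.countP_cons, ih]
    simp only [List.filterMap_cons]
    cases h : m.get? a with
    | none => simp
    | some val =>
      simp only [List.count_cons]
      by_cases hv : val = g
      · simp [hv]
      · have hv' : ¬ g = val := fun e => hv e.symm
        simp [hv]

-- occurrence-count of singletons = distinct-count of singletons
lemma pv_singletons (gs : List Int) :
    List.countP (fun g => gs.count g == 1) gs
      = List.countP (fun g => gs.count g == 1) (PySem.Set.ofList gs) := by
  have hperm : (PySem.Set.ofList gs).Perm gs.dedup :=
    (List.perm_ext_iff_of_nodup (PySem.Set.nodup_ofList gs) gs.nodup_dedup).mpr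
      (by intro a; simp [PySem.Set.mem_ofList, List.mem_dedup])
  rw [← List.sum_map_count_dedup_filter_eq_countP (fun g => gs.count g == 1) gs]
  have hone : ∀ x ∈ gs.dedup.filter (fun g => gs.count g == 1), List.count x gs = 1 := by
    intro x hx
    simpa using List.of_mem_filter hx
  rw [List.map_congr_left (by intro a ha; exact hone a ha)]
  rw [List.Perm.countP_eq _ hperm]
  simp [List.countP_eq_length_filter]

-- A's per-assignment contribution
lemma pv_perListA (m : PySem.Dict Int Int) (empleados : List Int) (v : Int) :
    empleados.foldl (fun violations emp =>
        match m.get? emp with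
        | none => violations
        | some g =>
          let count_same : Int :=
            empleados.foldl (fun s ee => if m.get? ee == some g then s + 1 else s) 0
          if count_same == 1 then violations + 1 else violations) v
      = v + (List.countP (fun emp =>
            ((m.get? emp).map (fun g =>
              (empleados.filterMap m.get?).count g == 1)).getD false) empleados : Int) := by
  rw [PySem.List.foldl_congr_mem empleados _
      (fun violations emp =>
        if ((m.get? emp).map (fun g =>
              (empleados.filterMap m.get?).count g == 1)).getD false
        then violations + 1 else violations) v ?_]
  · exact PySem.List.foldl_if_add_one _ empleados v
  · intro acc emp _
    cases h : m.get? emp with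
    | none => simp [h]
    | some g =>
      simp only [h, Option.map_some, Option.getD_some]
      rw [PySem.List.foldl_if_add_one (fun ee => m.get? ee == some g) empleados 0,
          pv_countA m empleados g]
      simp only [zero_add]
      by_cases hc : ((empleados.filterMap m.get?).count g) = 1
      · simp [hc]
      · have : ¬ (((empleados.filterMap m.get?).count g : Int) = 1) := by exact_mod_cast hc
        simp [hc, this]

-- per-assignment equality of A's and B's contributions
lemma pv_perList (m : PySem.Dict Int Int) (asg : List (Int × Int)) (v : Int) :
    (asg.map (·.2)).foldl (fun violations emp =>
        match m.get? emp with
        | none => violations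
        | some g =>
          let count_same : Int :=
            (asg.map (·.2)).foldl (fun s ee => if m.get? ee == some g then s + 1 else s) 0
          if count_same == 1 then violations + 1 else violations) v
      = v + ((asg.filterMap (fun p => m.get? p.2)).foldl
              (fun f g => f.insert g (f.getD g 0 + 1)) (PySem.Dict.empty : PySem.Dict Int Int)).values.foldl
              (fun s c => if c == 1 then s + 1 else s) 0 := by
  set empleados := asg.map (·.2) with hemp
  have hfm : asg.filterMap (fun p => m.get? p.2) = empleados.filterMap m.get? := by
    rw [hemp, List.filterMap_map]; rfl
  set gs := empleados.filterMap m.get? with hgs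
  rw [pv_perListA m empleados v, hfm, ← hgs]
  have hc : gs.foldl (fun f g => f.insert g (f.getD g 0 + 1)) (PySem.Dict.empty : PySem.Dict Int Int)
      = PySem.Dict.counter gs := PySem.Dict.foldl_insert_getD_add_one_eq_counter gs
  rw [hc]
  have hvals : (PySem.Dict.counter gs).values
      = (PySem.Set.ofList gs).map (fun k => ((gs.count k : Int))) := by
    simp only [PySem.Dict.values, PySem.Dict.items_counter, List.map_map]; rfl
  rw [hvals, PySem.List.foldl_if_add_one (fun c => c == 1) _ 0, zero_add]
  have hR : List.countP (fun c => c == (1:Int))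
        ((PySem.Set.ofList gs).map (fun k => ((gs.count k : Int))))
      = List.countP (fun g => gs.count g == 1) (PySem.Set.ofList gs) := by
    rw [List.countP_map]
    refine List.countP_congr ?_
    intro x _
    simp [Function.comp, Nat.cast_eq_one]
  have h2 : List.countP (fun emp =>
        ((m.get? emp).map (fun g => gs.count g == 1)).getD false) empleados
      = List.countP (fun g => gs.count g == 1) gs := by
    rw [hgs, List.countP_filterMap]
  rw [hR, ← pv_singletons gs, ← h2]

-- ===== VERDICT (by name: the statement is the Claim_ definition above) =====
theorem calculate_isolated_employee_spec : Claim_equal_calculate_isolated_employee := by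
  intro sol employees_g _
  unfold Spec_calculate_isolated_employee calculate_isolated_employee calculate_isolated_employee_alt
  refine PySem.List.foldl_congr_mem sol _ _ 0 ?_
  intro acc z _
  refine PySem.List.foldl_congr_mem z.2 _ _ acc ?_
  intro acc' asg _
  exact pv_perList (pvEmpToGroup employees_g) asg.2 acc'
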